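-- pv_equiv track=rewrite | github.com/SingularitySauce/Web_Science_Project_2020 | project_code/src/TwitterCrawler.py | find_ties_and_triads
-- ===== SOURCE A (Python) =====
-- def find_ties_and_triads(mentions_network, retweet_network, quote_network):
--
--     ties = []
--     triads = []
--
--     networks = [mentions_network, retweet_network, quote_network]
--
--     for network in networks:
--         users = network.keys()
--         for user in users:
--             connected_users = network[user]
--             for connected_user in connected_users:
--                 tie = (user, connected_user)
--                 if tie not in ties:
--                     ties.append((user, connected_user))
--
--     for tie in ties:
--         first = tie[0]
--         second = tie[1]
--         for tie_search in ties:
--             potential_second = tie_search[0]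
--             potential_third = tie_search[1]
--             if second == potential_second:
--                 triad = (first, second, potential_third)
--                 if triad not in triads:
--                     triads.append(triad)
--
--     return ties, triads
-- ===== SOURCE B (Python) =====
-- def find_ties_and_triads(mentions_network, retweet_network, quote_network):
--     # one pass with a seen-set for deduped ties; triads by indexing ties by source node
--     seen = set()
--     ties = []
--     for network in (mentions_network, retweet_network, quote_network):
--         for user, connected_users in network.items():
--             for connected_user in connected_users:
--                 tie = (user, connected_user)
--                 if tie not in seen:
--                     seen.add(tie)
--                     ties.append(tie)
--     by_src = {}
--     for a, b in ties:
--         by_src.setdefault(a, []).append(b)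
--     triads = []
--     triad_seen = set()
--     for first, second in ties:
--         for third in by_src.get(second, []):
--             triad = (first, second, third)
--             if triad not in triad_seen:
--                 triad_seen.add(triad)
--                 triads.append(triad)
--     return ties, triads
-- ===== Notes on version B (the rewrite author's own statement) =====
-- stated objective: faster
-- what changed: Replaces A's 'not in list' scans and the full quadratic cross-scan of ties by a seen-set for dedup and a source-node index (dict of lists) so each tie only meets its matching continuations.
import Mathlib
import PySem

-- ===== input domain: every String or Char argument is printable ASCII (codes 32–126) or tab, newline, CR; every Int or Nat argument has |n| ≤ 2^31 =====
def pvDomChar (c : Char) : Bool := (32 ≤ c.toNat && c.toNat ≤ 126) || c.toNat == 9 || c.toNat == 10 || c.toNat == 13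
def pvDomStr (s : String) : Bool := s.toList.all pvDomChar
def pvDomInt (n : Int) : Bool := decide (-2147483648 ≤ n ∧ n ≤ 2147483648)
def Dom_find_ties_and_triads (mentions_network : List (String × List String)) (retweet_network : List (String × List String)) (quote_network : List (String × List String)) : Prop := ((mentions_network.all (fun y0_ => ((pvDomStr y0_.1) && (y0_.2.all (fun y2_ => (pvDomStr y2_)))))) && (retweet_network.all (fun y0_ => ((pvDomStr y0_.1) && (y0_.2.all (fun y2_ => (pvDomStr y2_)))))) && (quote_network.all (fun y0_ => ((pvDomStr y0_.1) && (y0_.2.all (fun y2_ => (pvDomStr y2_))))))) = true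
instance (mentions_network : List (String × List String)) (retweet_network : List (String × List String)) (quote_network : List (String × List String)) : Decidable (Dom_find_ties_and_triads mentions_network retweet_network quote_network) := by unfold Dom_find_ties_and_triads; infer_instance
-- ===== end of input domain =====

-- B replaces A's list-membership dedup and quadratic tie cross-scan by a seen-set and a
-- source-node index (dict of lists), an asymptotically faster exact re-implementation.

-- ===== PORT A =====
def find_ties_and_triads (mentions_network : List (String × List String)) (retweet_network : List (String × List String)) (quote_network : List (String × List String)) : (List (String × String)) × (List (String × String × String)) :=
  let ties :=
    [mentions_network, retweet_network, quote_network].foldl (fun ties network =>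
      network.foldl (fun ties p =>
        p.2.foldl (fun ties connected_user =>
          if (p.1, connected_user) ∈ ties then ties else ties ++ [(p.1, connected_user)]) ties) ties) []
  let triads :=
    ties.foldl (fun triads tie =>
      ties.foldl (fun triads tie_search =>
        if tie.2 == tie_search.1 then
          if (tie.1, tie.2, tie_search.2) ∈ triads then triads
          else triads ++ [(tie.1, tie.2, tie_search.2)]
        else triads) triads) []
  (ties, triads)

-- ===== PORT B =====
def find_ties_and_triads_alt (mentions_network : List (String × List String)) (retweet_network : List (String × List String)) (quote_network : List (String × List String)) : (List (String × String)) × (List (String × String × String)) :=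
  let st :=
    [mentions_network, retweet_network, quote_network].foldl (fun st network =>
      network.foldl (fun st p =>
        p.2.foldl (fun st connected_user =>
          if (p.1, connected_user) ∈ st.1 then st
          else (PySem.Set.add st.1 (p.1, connected_user), st.2 ++ [(p.1, connected_user)])) st) st)
      ((PySem.Set.empty : PySem.Set (String × String)), ([] : List (String × String)))
  let ties := st.2
  let by_src := ties.foldl (fun d t => d.modify t.1 [] (· ++ [t.2])) PySem.Dict.empty
  let tst :=
    ties.foldl (fun tst t =>
      (by_src.getD t.2 []).foldl (fun tst third =>
        if (t.1, t.2, third) ∈ tst.1 then tst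
        else (PySem.Set.add tst.1 (t.1, t.2, third), tst.2 ++ [(t.1, t.2, third)])) tst)
      ((PySem.Set.empty : PySem.Set (String × String × String)), ([] : List (String × String × String)))
  (ties, tst.2)

-- ===== PRECONDITION & SPEC =====
def Spec_find_ties_and_triads (mentions_network : List (String × List String)) (retweet_network : List (String × List String)) (quote_network : List (String × List String)) (out : (List (String × String)) × (List (String × String × String))) : Prop := out = find_ties_and_triads_alt mentions_network retweet_network quote_network
instance (mentions_network : List (String × List String)) (retweet_network : List (String × List String)) (quote_network : List (String × List String)) (out : (List (String × String)) × (List (String × String × String))) : Decidable (Spec_find_ties_and_triads mentions_network retweet_network quote_network out) := by unfold Spec_find_ties_and_triads; infer_instance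

-- ===== CLAIM (what is proved, stated in full; the proofs are below) =====
def Claim_equal_find_ties_and_triads : Prop := ∀ (mentions_network : List (String × List String)) (retweet_network : List (String × List String)) (quote_network : List (String × List String)), Dom_find_ties_and_triads mentions_network retweet_network quote_network → Spec_find_ties_and_triads mentions_network retweet_network quote_network (find_ties_and_triads mentions_network retweet_network quote_network)

-- ===== LEMMAS AND PROOFS =====

-- A seen-set + appended-list dedup loop, started on a duplicated accumulator, tracks the
-- plain list-membership dedup loop of A (both components stay equal to A's list).
theorem pv_sim_fold {T B : Type} [BEq T] [LawfulBEq T] [DecidableEq T] (f : B -> T) (l : List B) (s : List T) :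
    l.foldl (fun st x => if f x ∈ st.1 then st else (PySem.Set.add st.1 (f x), st.2 ++ [f x])) (s, s)
    = (l.foldl (fun acc x => if f x ∈ acc then acc else acc ++ [f x]) s,
       l.foldl (fun acc x => if f x ∈ acc then acc else acc ++ [f x]) s) := by
  induction l generalizing s with
  | nil => rfl
  | cons a t ih =>
    simp only [List.foldl_cons]
    by_cases h : f a ∈ s
    · simp only [h, if_pos]; exact ih s
    · simp only [h, if_neg, not_false_iff, PySem.Set.add_of_not_mem h]
      exact ih (s ++ [f a])

-- Two-level version: an outer loop whose body is such a dedup loop over g x.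
theorem pv_sim_fold2 {T B C : Type} [BEq T] [LawfulBEq T] [DecidableEq T]
    (g : B -> List C) (h : B -> C -> T) (l : List B) (s : List T) :
    l.foldl (fun st x => (g x).foldl (fun st y => if h x y ∈ st.1 then st else (PySem.Set.add st.1 (h x y), st.2 ++ [h x y])) st) (s, s)
    = (l.foldl (fun acc x => (g x).foldl (fun acc y => if h x y ∈ acc then acc else acc ++ [h x y]) acc) s,
       l.foldl (fun acc x => (g x).foldl (fun acc y => if h x y ∈ acc then acc else acc ++ [h x y]) acc) s) := by
  induction l generalizing s with
  | nil => rfl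
  | cons a t ih =>
    simp only [List.foldl_cons]
    rw [pv_sim_fold (fun y => h a y) (g a) s]
    exact ih _

-- The source-node index built by B lists, per key, exactly the targets A's filtered scan visits.
theorem pv_idx (T : List (String × String)) (c : String) :
    (T.foldl (fun d t => d.modify t.1 [] (· ++ [t.2])) PySem.Dict.empty).getD c []
    = (T.filter (fun ts => c == ts.1)).map (·.2) := by
  rw [PySem.Dict.getD_foldl_modify_append]
  simp only [PySem.Dict.getD_empty, List.nil_append]
  congr 1
  apply List.filter_congr
  intro x _
  cases h : (x.1 == c) <;> cases h' : (c == x.1) <;> simp_all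

-- B's whole triad phase, run on any deduped tie list T, returns A's triad list.
theorem pv_triads (T : List (String × String)) :
    (T.foldl (fun tst t =>
        (((T.foldl (fun d t => d.modify t.1 [] (· ++ [t.2])) PySem.Dict.empty).getD t.2 []).foldl
          (fun tst third =>
            if (t.1, t.2, third) ∈ tst.1 then tst
            else (PySem.Set.add tst.1 (t.1, t.2, third), tst.2 ++ [(t.1, t.2, third)])) tst))
      ((PySem.Set.empty : PySem.Set (String × String × String)), ([] : List (String × String × String)))).2
    = T.foldl (fun triads tie =>
        T.foldl (fun triads ts =>
          if tie.2 == ts.1 then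
            if (tie.1, tie.2, ts.2) ∈ triads then triads else triads ++ [(tie.1, tie.2, ts.2)]
          else triads) triads) [] := by
  simp only [pv_idx]
  rw [show ((PySem.Set.empty : PySem.Set (String × String × String)), ([] : List (String × String × String)))
        = (([] : List (String × String × String)), ([] : List (String × String × String))) from rfl]
  rw [pv_sim_fold2 (fun t : String × String => (T.filter (fun ts => t.2 == ts.1)).map (·.2))
        (fun t third => (t.1, t.2, third)) T ([] : List (String × String × String))]
  refine (PySem.List.foldl_congr_mem' _ _ _ _ ?_).symm
  intro t ht acc
  rw [PySem.List.foldl_if_eq_foldl_filter, List.foldl_map]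

-- ===== VERDICT (by name: the statement is the Claim_ definition above) =====
theorem find_ties_and_triads_spec : Claim_equal_find_ties_and_triads := by
  intro m r q _
  unfold Spec_find_ties_and_triads find_ties_and_triads find_ties_and_triads_alt
  simp only [List.foldl_cons, List.foldl_nil]
  rw [show ((PySem.Set.empty : PySem.Set (String × String)), ([] : List (String × String)))
        = (([] : List (String × String)), ([] : List (String × String))) from rfl]
  rw [pv_sim_fold2 (fun p : String × List String => p.2) (fun p cu => (p.1, cu)) m,
      pv_sim_fold2 (fun p : String × List String => p.2) (fun p cu => (p.1, cu)) r,
      pv_sim_fold2 (fun p : String × List String => p.2) (fun p cu => (p.1, cu)) q]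
  exact Prod.ext rfl (pv_triads _).symm
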